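-- pv_equiv track=rewrite | github.com/jcolinpatrick/kryptos | scripts/k3_continuity/e_cfm_07_k3_rotational.py | factorizations
-- ===== SOURCE A (Python) =====
-- import math
--
-- def factorizations(n: int, min_dim: int = 2) -> list[tuple[int, int]]:
--     """All (nrows, ncols) pairs where nrows * ncols = n, nrows >= min_dim, ncols >= min_dim."""
--     facts = []
--     for r in range(min_dim, int(math.sqrt(n)) + 1):
--         if n % r == 0:
--             c = n // r
--             if c >= min_dim:
--                 facts.append((r, c))
--                 if r != c:
--                     facts.append((c, r))
--     return sorted(facts)
-- ===== SOURCE B (Python) =====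
-- def factorizations(n: int, min_dim: int = 2) -> list[tuple[int, int]]:
--     """All (nrows, ncols) pairs where nrows * ncols = n, nrows >= min_dim, ncols >= min_dim.
--
--     Two-accumulator enumeration: divisor pairs (r, c) with r <= c are collected in
--     ascending r order, their mirrors (c, r) in a second list whose reversal is
--     ascending too, so the concatenation is already sorted and no sort() is needed.
--     """
--     small = []
--     large = []
--     r = min_dim
--     while r * r <= n:
--         if n % r == 0:
--             c = n // r
--             if c >= min_dim:
--                 small.append((r, c))
--                 if r < c:
--                     large.append((c, r))
--         r += 1
--     return small + large[::-1]
-- ===== Notes on version B (the rewrite author's own statement) =====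
-- stated objective: alternative
-- what changed: B replaces A's collect-pairs-and-mirrors-then-sorted() strategy with a two-accumulator enumeration: small halves (r,c) are emitted in ascending order while mirrors (c,r) go to a second list whose reversal is ascending, so the concatenation is already sorted and both the mirror interleaving and the final sort are gone.
import Mathlib
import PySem

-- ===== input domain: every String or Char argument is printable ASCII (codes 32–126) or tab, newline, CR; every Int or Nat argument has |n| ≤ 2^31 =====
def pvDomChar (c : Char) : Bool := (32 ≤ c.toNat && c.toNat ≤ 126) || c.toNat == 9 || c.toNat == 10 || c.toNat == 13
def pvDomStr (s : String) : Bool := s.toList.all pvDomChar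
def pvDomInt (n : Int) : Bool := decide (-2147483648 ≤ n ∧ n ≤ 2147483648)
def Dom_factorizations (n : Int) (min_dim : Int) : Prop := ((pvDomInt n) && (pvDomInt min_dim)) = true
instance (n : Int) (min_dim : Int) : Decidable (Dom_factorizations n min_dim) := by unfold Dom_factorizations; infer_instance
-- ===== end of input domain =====

-- B replaces A's collect-and-mirror-then-sorted() pass with a two-accumulator enumeration whose
-- concatenation is already sorted (objective: alternative; return values proved equal on Pre_).

-- ===== PORT A =====
-- int(math.sqrt(n)) is ported as Nat.sqrt n.toNat : exact for 0 ≤ n ≤ 2^31 (math.sqrt is a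
-- correctly-rounded double there and int() truncates); for n < 0 math.sqrt raises ValueError,
-- excluded by Pre_.
def factorizations (n : Int) (min_dim : Int) : List (Int × Int) :=
  let facts := (PySem.List.pyRange min_dim ((Nat.sqrt n.toNat : Int) + 1) 1).foldl
    (fun facts r =>
      if PySem.Int.mod n r = 0 then
        let c := PySem.Int.floordiv n r
        if c ≥ min_dim then
          let facts := facts ++ [(r, c)]
          if r ≠ c then facts ++ [(c, r)] else facts
        else facts
      else facts) ([] : List (Int × Int))
  PySem.List.sorted2 facts (fun p => p.1) (fun p => p.2) false

-- ===== PORT B =====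
-- the 'while r * r <= n' loop of Source B; small/large are the two accumulators; fuel only makes
-- the loop total: it never runs out, since the guard forces r ≤ n (see pvAltGo_spec below)
def factorizationsAltGo (n min_dim : Int) : Nat → Int → List (Int × Int) → List (Int × Int) →
    List (Int × Int)
  | 0, _, small, large => small ++ large.reverse
  | fuel + 1, r, small, large =>
    if r * r ≤ n then
      if PySem.Int.mod n r = 0 then
        let c := PySem.Int.floordiv n r
        if c ≥ min_dim then
          factorizationsAltGo n min_dim fuel (r + 1) (small ++ [(r, c)])
            (if r < c then large ++ [(c, r)] else large)
        else factorizationsAltGo n min_dim fuel (r + 1) small large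
      else factorizationsAltGo n min_dim fuel (r + 1) small large
    else small ++ large.reverse

def factorizations_alt (n : Int) (min_dim : Int) : List (Int × Int) :=
  factorizationsAltGo n min_dim ((n + 1 - min_dim).toNat + 1) min_dim [] []

-- ===== PRECONDITION & SPEC =====
-- Pre_ excludes exactly the inputs on which A raises: n < 0 (ValueError from math.sqrt) and
-- min_dim ≤ 0 (the loop reaches r = 0 and 'n % r' raises ZeroDivisionError).
def Pre_factorizations (n : Int) (min_dim : Int) : Prop := 0 ≤ n ∧ 1 ≤ min_dim
instance (n : Int) (min_dim : Int) : Decidable (Pre_factorizations n min_dim) := by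
  unfold Pre_factorizations; infer_instance
def pvWitness_factorizations : Int × Int := (12, 2)

def Spec_factorizations (n : Int) (min_dim : Int) (out : List (Int × Int)) : Prop := out = factorizations_alt n min_dim
instance (n : Int) (min_dim : Int) (out : List (Int × Int)) : Decidable (Spec_factorizations n min_dim out) := by unfold Spec_factorizations; infer_instance

-- ===== CLAIM (what is proved, stated in full; the proofs are below) =====
def Claim_equal_factorizations : Prop := ∀ (n : Int) (min_dim : Int), Dom_factorizations n min_dim → Pre_factorizations n min_dim → Spec_factorizations n min_dim (factorizations n min_dim)

-- ===== LEMMAS AND PROOFS =====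

-- the integer square-root bound int(math.sqrt(n)) as an Int
def pvSq (n : Int) : Int := (Nat.sqrt n.toNat : Int)

-- the small-half pair emitted at r (B's 'small.append')
def pvG1 (n min_dim r : Int) : List (Int × Int) :=
  if PySem.Int.mod n r = 0 ∧ min_dim ≤ PySem.Int.floordiv n r then
    [(r, PySem.Int.floordiv n r)] else []

-- the mirror pair emitted at r (B's 'large.append')
def pvG2 (n min_dim r : Int) : List (Int × Int) :=
  if PySem.Int.mod n r = 0 ∧ min_dim ≤ PySem.Int.floordiv n r ∧ r < PySem.Int.floordiv n r then
    [(PySem.Int.floordiv n r, r)] else []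

-- A's per-iteration contribution, literally
def pvGA (n min_dim r : Int) : List (Int × Int) :=
  if PySem.Int.mod n r = 0 then
    if PySem.Int.floordiv n r ≥ min_dim then
      if r ≠ PySem.Int.floordiv n r then
        [(r, PySem.Int.floordiv n r), (PySem.Int.floordiv n r, r)]
      else [(r, PySem.Int.floordiv n r)]
    else []
  else []

lemma pv_le_sqrt_iff (n r : Int) (hn : 0 ≤ n) (hr : 1 ≤ r) :
    r * r ≤ n ↔ r ≤ pvSq n := by
  unfold pvSq
  constructor
  · intro h
    have h1 : (r.toNat : Int) * r.toNat ≤ (n.toNat : Int) := by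
      rw [Int.toNat_of_nonneg (by omega), Int.toNat_of_nonneg hn]; exact h
    have h2 : r.toNat * r.toNat ≤ n.toNat := by exact_mod_cast h1
    have := Nat.le_sqrt.mpr h2
    omega
  · intro h
    have h2 : r.toNat ≤ Nat.sqrt n.toNat := by omega
    have h3 : r.toNat * r.toNat ≤ n.toNat := Nat.le_sqrt.mp h2
    have h4 : (r.toNat : Int) * r.toNat ≤ (n.toNat : Int) := by exact_mod_cast h3
    rw [Int.toNat_of_nonneg (by omega), Int.toNat_of_nonneg hn] at h4; exact h4

lemma pv_sqrt_lt_iff (n c : Int) (hn : 0 ≤ n) (hc : 0 ≤ c) :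
    pvSq n < c ↔ n < c * c := by
  unfold pvSq
  constructor
  · intro h
    have h2 : Nat.sqrt n.toNat < c.toNat := by omega
    have h3 : n.toNat < c.toNat * c.toNat := Nat.sqrt_lt.mp h2
    have h4 : (n.toNat : Int) < (c.toNat : Int) * c.toNat := by exact_mod_cast h3
    rw [Int.toNat_of_nonneg hn, Int.toNat_of_nonneg hc] at h4; exact h4
  · intro h
    have h1 : (n.toNat : Int) < (c.toNat : Int) * c.toNat := by
      rw [Int.toNat_of_nonneg hn, Int.toNat_of_nonneg hc]; exact h
    have h2 : n.toNat < c.toNat * c.toNat := by exact_mod_cast h1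
    have := Nat.sqrt_lt.mpr h2
    omega

lemma pv_div_mul {n r : Int} (hr : 0 < r) (hm : PySem.Int.mod n r = 0) :
    r * PySem.Int.floordiv n r = n := by
  rw [PySem.Int.floordiv_eq_ediv_of_pos hr]
  exact Int.mul_ediv_cancel' ((PySem.Int.mod_eq_zero_iff_dvd n r).mp hm)

lemma pvG1_mem {n md r : Int} {p : Int × Int} (hp : p ∈ pvG1 n md r) :
    p.1 = r ∧ p.2 = PySem.Int.floordiv n r ∧ PySem.Int.mod n r = 0 ∧ md ≤ p.2 := by
  unfold pvG1 at hp
  split_ifs at hp with h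
  · simp at hp; subst hp; exact ⟨rfl, rfl, h.1, h.2⟩
  · simp at hp

lemma pvG2_mem {n md r : Int} {q : Int × Int} (hq : q ∈ pvG2 n md r) :
    q.1 = PySem.Int.floordiv n r ∧ q.2 = r ∧ PySem.Int.mod n r = 0 ∧ md ≤ q.1 ∧ r < q.1 := by
  unfold pvG2 at hq
  split_ifs at hq with h
  · simp at hq; subst hq; exact ⟨rfl, rfl, h.1, h.2.1, h.2.2⟩
  · simp at hq

-- A's fold is the flatMap of pvGA
lemma pvA_fold (n min_dim : Int) :
    (PySem.List.pyRange min_dim (pvSq n + 1) 1).foldl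
      (fun facts r =>
        if PySem.Int.mod n r = 0 then
          let c := PySem.Int.floordiv n r
          if c ≥ min_dim then
            let facts := facts ++ [(r, c)]
            if r ≠ c then facts ++ [(c, r)] else facts
          else facts
        else facts) ([] : List (Int × Int)) =
    (PySem.List.pyRange min_dim (pvSq n + 1) 1).flatMap (pvGA n min_dim) := by
  have hstep : (fun (facts : List (Int × Int)) r =>
      if PySem.Int.mod n r = 0 then
        let c := PySem.Int.floordiv n r
        if c ≥ min_dim then
          let facts := facts ++ [(r, c)]
          if r ≠ c then facts ++ [(c, r)] else facts
        else facts
      else facts) = (fun facts r => facts ++ pvGA n min_dim r) := by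
    funext facts r
    simp only [pvGA]
    split_ifs <;> simp
  rw [hstep, PySem.List.foldl_append_eq_flatMap]
  simp

-- on the range, A's contribution is B's two contributions in order
lemma pvGA_eq (n min_dim r : Int) (hn : 0 ≤ n) (hr : 1 ≤ r) (hrs : r ≤ pvSq n) :
    pvGA n min_dim r = pvG1 n min_dim r ++ pvG2 n min_dim r := by
  by_cases hm : PySem.Int.mod n r = 0
  · have hnc : r * PySem.Int.floordiv n r = n := pv_div_mul (by omega) hm
    have hrs2 : r * r ≤ n := (pv_le_sqrt_iff n r hn hr).mpr hrs
    have hrc : r ≤ PySem.Int.floordiv n r := by nlinarith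
    by_cases hmd : min_dim ≤ PySem.Int.floordiv n r
    · by_cases hlt : r < PySem.Int.floordiv n r
      · simp [pvGA, pvG1, pvG2, hm, hmd, hlt, ne_of_lt hlt, ge_iff_le]
      · have heq : r = PySem.Int.floordiv n r := by omega
        simp [pvGA, pvG1, pvG2, hm, ge_iff_le, ← heq]
    · simp [pvGA, pvG1, pvG2, hm, hmd, ge_iff_le]
  · simp [pvGA, pvG1, pvG2, hm]

lemma pv_flatMap_append_perm {α β : Type} (l : List α) (f g : α → List β) :
    (l.flatMap fun x => f x ++ g x).Perm (l.flatMap f ++ l.flatMap g) := by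
  induction l with
  | nil => simp
  | cons x t ih =>
    simp only [List.flatMap_cons, List.append_assoc]
    refine List.Perm.append_left _ ?_
    refine (List.Perm.append_left _ ih).trans ?_
    rw [← List.append_assoc, ← List.append_assoc]
    exact List.Perm.append_right _ List.perm_append_comm

lemma pv_flatMap_congr {α β : Type} {l : List α} {f g : α → List β}
    (h : ∀ a ∈ l, f a = g a) : l.flatMap f = l.flatMap g := by
  induction l with
  | nil => rfl
  | cons x t ih =>
    simp only [List.flatMap_cons, h x (by simp), ih fun a ha => h a (by simp [ha])]

-- sorted2 with fst/snd keys is sorted with the lexicographic key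
lemma pv_sorted2_eq_sorted_lex (xs : List (Int × Int)) :
    PySem.List.sorted2 xs (fun p => p.1) (fun p => p.2) false =
    PySem.List.sorted xs (fun p => (toLex p : Lex (Int × Int))) false := by
  unfold PySem.List.sorted2 PySem.List.sorted
  simp only [Bool.false_eq_true, if_false]
  have hb : (fun (a b : Int × Int) =>
        decide (a.1 < b.1) || (!decide (b.1 < a.1) && decide (a.2 < b.2)))
      = (fun (a b : Int × Int) => decide ((toLex a : Lex (Int × Int)) < toLex b)) := by
    funext a b
    by_cases h1 : a.1 < b.1 <;> by_cases h2 : b.1 < a.1 <;> by_cases h3 : a.2 < b.2 <;>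
      simp [h1, h2, h3, Prod.Lex.lt_iff] <;> omega
  rw [hb]

-- B's loop computes the two flatMaps over the remaining range (fuel never runs out)
lemma pvAltGo_spec_aux (n min_dim : Int) (hn : 0 ≤ n) :
    ∀ (fuel : Nat) (r : Int), (n + 1 - r).toNat < fuel → 1 ≤ r → ∀ small large,
      factorizationsAltGo n min_dim fuel r small large =
        (small ++ (PySem.List.pyRange r (pvSq n + 1) 1).flatMap (pvG1 n min_dim)) ++
        (large ++ (PySem.List.pyRange r (pvSq n + 1) 1).flatMap (pvG2 n min_dim)).reverse := by
  intro fuel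
  induction fuel with
  | zero => intro r hfu; omega
  | succ fuel ih =>
    intro r hfu hr small large
    unfold factorizationsAltGo
    by_cases hg : r * r ≤ n
    · have hrs : r ≤ pvSq n := (pv_le_sqrt_iff n r hn hr).mp hg
      have hrn : r ≤ n := by nlinarith
      have hfu' : (n + 1 - (r + 1)).toNat < fuel := by omega
      rw [if_pos hg, PySem.List.pyRange_one_cons (by omega : r < pvSq n + 1)]
      simp only [List.flatMap_cons]
      by_cases hm : PySem.Int.mod n r = 0
      · rw [if_pos hm]
        by_cases hmd : PySem.Int.floordiv n r ≥ min_dim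
        · rw [if_pos hmd, ih (r + 1) hfu' (by omega)]
          by_cases hlt : r < PySem.Int.floordiv n r
          · rw [if_pos hlt]
            simp [pvG1, pvG2, hm, hmd, hlt, List.append_assoc]
          · rw [if_neg hlt]
            simp [pvG1, pvG2, hm, hmd, hlt, List.append_assoc]
        · rw [if_neg hmd, ih (r + 1) hfu' (by omega)]
          have hmd' : ¬ min_dim ≤ PySem.Int.floordiv n r := hmd
          simp [pvG1, pvG2, hm, hmd']
      · rw [if_neg hm, ih (r + 1) hfu' (by omega)]
        simp [pvG1, pvG2, hm]
    · have hlt : pvSq n < r := by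
        have hnn : n < r * r := by omega
        exact (pv_sqrt_lt_iff n r hn (by omega)).mpr hnn
      rw [if_neg hg, PySem.List.pyRange_one_eq_nil (by omega)]
      simp

lemma pvAltGo_spec (n min_dim r : Int) (hn : 0 ≤ n) (hr : 1 ≤ r)
    (small large : List (Int × Int)) :
    factorizationsAltGo n min_dim ((n + 1 - r).toNat + 1) r small large =
      (small ++ (PySem.List.pyRange r (pvSq n + 1) 1).flatMap (pvG1 n min_dim)) ++
      (large ++ (PySem.List.pyRange r (pvSq n + 1) 1).flatMap (pvG2 n min_dim)).reverse :=
  pvAltGo_spec_aux n min_dim hn _ r (by omega) hr small large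

-- ===== VERDICT (by name: the statement is the Claim_ definition above) =====
theorem factorizations_spec : Claim_equal_factorizations := by
  intro n min_dim hdom hpre
  obtain ⟨hn, hmd⟩ : 0 ≤ n ∧ 1 ≤ min_dim := hpre
  unfold Spec_factorizations factorizations factorizations_alt
  rw [pvAltGo_spec n min_dim min_dim hn hmd [] []]
  simp only [List.nil_append]
  rw [show ((Nat.sqrt n.toNat : Int)) = pvSq n from rfl, pvA_fold n min_dim,
    pv_sorted2_eq_sorted_lex]
  apply PySem.List.sorted_eq_of_perm_of_pairwise_lt
  · -- permutation
    have hc : (PySem.List.pyRange min_dim (pvSq n + 1) 1).flatMap (pvGA n min_dim) =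
        (PySem.List.pyRange min_dim (pvSq n + 1) 1).flatMap
          (fun r => pvG1 n min_dim r ++ pvG2 n min_dim r) :=
      pv_flatMap_congr (fun r hrm => by
        have hb := PySem.List.mem_pyRange_one.mp hrm
        exact pvGA_eq n min_dim r hn (by omega) (by omega))
    rw [hc]
    refine List.Perm.trans ?_ (pv_flatMap_append_perm _ _ _).symm
    exact List.Perm.append_left _ (List.reverse_perm _)
  · -- strictly increasing under the lexicographic key
    have main : ((PySem.List.pyRange min_dim (pvSq n + 1) 1).flatMap (pvG1 n min_dim) ++
        ((PySem.List.pyRange min_dim (pvSq n + 1) 1).flatMap (pvG2 n min_dim)).reverse).Pairwise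
        (fun a b : Int × Int => a.1 < b.1) := by
      rw [List.pairwise_append]
      refine ⟨?_, ?_, ?_⟩
      · rw [List.pairwise_flatMap]
        refine ⟨fun a _ => ?_, ?_⟩
        · unfold pvG1; split_ifs <;> simp
        · refine (PySem.List.pairwise_lt_pyRange_one _ _).imp ?_
          intro a b hab p hp q hq
          rw [(pvG1_mem hp).1, (pvG1_mem hq).1]; exact hab
      · rw [List.pairwise_reverse, List.pairwise_flatMap]
        refine ⟨fun a _ => ?_, ?_⟩
        · unfold pvG2; split_ifs <;> simp
        · refine List.Pairwise.imp_of_mem ?_ (PySem.List.pairwise_lt_pyRange_one _ _)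
          intro r1 r2 hm1 hm2 hab p hp q hq
          obtain ⟨hp1, hp2, hpm, hpmd, hplt⟩ := pvG2_mem hp
          obtain ⟨hq1, hq2, hqm, hqmd, hqlt⟩ := pvG2_mem hq
          have hb1 := PySem.List.mem_pyRange_one.mp hm1
          have hb2 := PySem.List.mem_pyRange_one.mp hm2
          have hr1 : (1:Int) ≤ r1 := by omega
          have e1 : r1 * PySem.Int.floordiv n r1 = n := pv_div_mul (by omega) hpm
          have e2 : r2 * PySem.Int.floordiv n r2 = n := pv_div_mul (by omega) hqm
          -- q.1 = n/r2 < n/r1 = p.1 since r1 < r2 and both are positive divisors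
          rw [hp1, hq1]
          nlinarith [hplt, hqlt, hab]
      · intro a ha b hb
        rw [List.mem_reverse] at hb
        obtain ⟨r1, hr1m, hp⟩ := List.mem_flatMap.mp ha
        obtain ⟨r2, hr2m, hq⟩ := List.mem_flatMap.mp hb
        have hb1 := PySem.List.mem_pyRange_one.mp hr1m
        have hb2 := PySem.List.mem_pyRange_one.mp hr2m
        obtain ⟨hp1, hp2, hpm, hpmd⟩ := pvG1_mem hp
        obtain ⟨hq1, hq2, hqm, hqmd, hqlt⟩ := pvG2_mem hq
        have e2 : r2 * PySem.Int.floordiv n r2 = n := pv_div_mul (by omega) hqm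
        have hq1pos : 0 ≤ b.1 := by omega
        have hgt : pvSq n < b.1 := by
          refine (pv_sqrt_lt_iff n b.1 hn hq1pos).mpr ?_
          rw [hq1] at hqlt ⊢
          nlinarith
        omega
    exact main.imp fun h => Prod.Lex.lt_iff.mpr (Or.inl h)
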